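-- pv_equiv track=rewrite | github.com/qymmore/AOC-python | 2025/day 6/day6.py | compute_operations_reversed
-- ===== SOURCE A (Python) =====
-- def compute_operations_reversed(rows):
--     grid = [list(row) for row in rows]
--     n_rows = len(grid)
--     n_cols = len(grid[0])
--
--     # identify all non-empty columns
--     is_non_empty = [any(grid[r][c] != ' ' for r in range(n_rows)) for c in range(n_cols)]
--
--     # identify all columns with problems
--
--     problems = []
--     c = 0
--
--     while c < n_cols:
--         if is_non_empty[c]:
--             start_c = c
--             while c < n_cols and is_non_empty[c]:
--                 c += 1
--             end_c = c  # exclusive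
--             problems.append((start_c, end_c))
--         else:
--             c += 1
--
--     total_sum = 0
--
--     for start, end in problems:
--         numbers = []
--
--         for col in range(start, end):
--             num_str = ''.join(grid[r][col] for r in range(n_rows - 1)).strip()
--             if num_str:
--                 numbers.append(int(num_str))
--
--         operator_str = ''.join(grid[n_rows - 1][start:end]).strip()
--         if operator_str == '+':
--             result = sum(numbers)
--         elif operator_str == '*':
--             result = 1
--             for num in numbers:
--                 result *= num
--         else:
--             raise ValueError("Unknown operator: {}".format(operator_str))
--         total_sum += result
--
--     return total_sum
-- ===== SOURCE B (Python) =====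
-- def compute_operations_reversed(rows):
--     n_rows = len(rows)
--     n_cols = len(rows[0])
--     total = 0
--     in_group = False
--     acc_sum = 0
--     acc_prod = 1
--     op_chars = []
--
--     def close():
--         op = ''.join(op_chars).strip()
--         if op == '+':
--             return acc_sum
--         elif op == '*':
--             return acc_prod
--         raise ValueError("Unknown operator: {}".format(op))
--
--     for c in range(n_cols):
--         col = ''.join(rows[r][c] for r in range(n_rows))
--         if col.strip(' ') == '':
--             if in_group:
--                 total += close()
--                 in_group = False
--                 acc_sum, acc_prod, op_chars = 0, 1, []
--         else:
--             in_group = True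
--             op_chars.append(col[-1])
--             t = col[:-1].strip()
--             if t:
--                 n = int(t)
--                 acc_sum += n
--                 acc_prod *= n
--     if in_group:
--         total += close()
--     return total
-- ===== Notes on version B (the rewrite author's own statement) =====
-- stated objective: alternative
-- what changed: B replaces A's three staged passes (per-cell boolean column array, a while-loop state machine building a problems list of (start,end) pairs, then a second pass re-scanning the grid per problem) by ONE streaming left-to-right pass over the columns that keeps running sum and product accumulators plus the operator characters and closes each group on the fly at a blank column or at the end, never materialising flags or a problems list.
-- outside the precondition, e.g. on compute_operations_reversed(['11', '+']): A returns 2, B raises IndexError; on compute_operations_reversed(['647', '+']): A returns 17, B raises IndexError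
import Mathlib
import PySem

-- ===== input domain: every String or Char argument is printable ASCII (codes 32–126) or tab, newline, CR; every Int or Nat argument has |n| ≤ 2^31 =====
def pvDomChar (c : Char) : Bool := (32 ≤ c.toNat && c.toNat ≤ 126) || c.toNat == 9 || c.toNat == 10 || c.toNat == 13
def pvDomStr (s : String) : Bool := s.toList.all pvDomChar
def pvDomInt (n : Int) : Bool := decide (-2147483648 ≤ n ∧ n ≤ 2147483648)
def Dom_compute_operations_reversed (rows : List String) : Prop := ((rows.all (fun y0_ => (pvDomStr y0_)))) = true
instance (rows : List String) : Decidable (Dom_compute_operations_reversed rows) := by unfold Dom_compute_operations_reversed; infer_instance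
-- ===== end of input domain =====

-- B replaces A's staged passes (boolean column array, while-loop state machine building a problems
-- list, second per-problem re-scan of the grid) by one streaming pass over the columns with running
-- sum/product accumulators, closing each group on the fly: alternative decomposition, same cost.

-- ===== PORT A =====
-- any(grid[r][c] != ' ' for r in range(n_rows)) — short-circuit; none = IndexError
def pyAnyColNe : List (List Char) → Nat → Option Bool
  | [], _ => some false
  | row :: rest, c =>
      match PySem.List.pyGet? row (c : Int) with
      | none => none
      | some ch => if ch ≠ ' ' then some true else pyAnyColNe rest c

-- the is_non_empty list comprehension over range(n_cols)
def flagsA (g : List (List Char)) : List Nat → Option (List Bool)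
  | [] => some []
  | c :: cs =>
      (pyAnyColNe g c).bind fun b =>
      (flagsA g cs).bind fun rest =>
      some (b :: rest)

-- the while-loop state machine: state = current column, open run start (start_c)
def goProblems : List Bool → Nat → Option Nat → List (Nat × Nat)
  | [], _, none => []
  | [], c, some s => [(s, c)]
  | b :: rest, c, none =>
      if b then goProblems rest (c + 1) (some c) else goProblems rest (c + 1) none
  | b :: rest, c, some s =>
      if b then goProblems rest (c + 1) (some s) else (s, c) :: goProblems rest (c + 1) none

-- ''.join(grid[r][col] for r in range(n_rows - 1)) — called on g.dropLast
def numStrA : List (List Char) → Nat → Option (List Char)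
  | [], _ => some []
  | row :: rest, c =>
      (PySem.List.pyGet? row (c : Int)).bind fun ch =>
      (numStrA rest c).bind fun t =>
      some (ch :: t)

-- the numbers-collecting for-loop of one problem
def collectNumsA (g : List (List Char)) : List Nat → Option (List Int)
  | [] => some []
  | c :: cs =>
      (numStrA g.dropLast c).bind fun s =>
      let t := PySem.Chars.strip s
      if t = [] then collectNumsA g cs
      else
        (PySem.Int.ofChars? t).bind fun n =>
        (collectNumsA g cs).bind fun rest =>
        some (n :: rest)

-- body of 'for start, end in problems'
def problemValueA (g : List (List Char)) (start stop : Nat) : Option Int :=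
  (collectNumsA g (List.range' start (stop - start))).bind fun numbers =>
  (PySem.List.pyGet? g ((g.length : Int) - 1)).bind fun opRow =>
  let op := PySem.Chars.strip (PySem.List.slice opRow (some (start : Int)) (some (stop : Int)))
  if op = ['+'] then some numbers.sum
  else if op = ['*'] then some (numbers.foldl (· * ·) 1)
  else none  -- raise ValueError

def computeA? (rows : List String) : Option Int :=
  (PySem.List.pyGet? (rows.map String.toList) (0 : Int)).bind fun row0 =>  -- len(grid[0])
  (flagsA (rows.map String.toList) (List.range row0.length)).bind fun flags =>
  (goProblems flags 0 none).foldlM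
    (fun acc p => (problemValueA (rows.map String.toList) p.1 p.2).bind fun v => some (acc + v)) 0

def compute_operations_reversed (rows : List String) : Int :=
  (computeA? rows).getD 0   -- none = the Python raises; such inputs are outside Pre_

-- ===== PORT B =====
-- ''.join(rows[r][c] for r in range(n_rows)) — one column string
def colStrB : List (List Char) → Nat → Option (List Char)
  | [], _ => some []
  | row :: rest, c =>
      (PySem.List.pyGet? row (c : Int)).bind fun ch =>
      (colStrB rest c).bind fun t =>
      some (ch :: t)

-- close(): pick the accumulated sum or product by the operator string, or raise ValueError (none)
def finB (ops : List Char) (s p : Int) : Option Int :=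
  if PySem.Chars.strip ops = ['+'] then some s
  else if PySem.Chars.strip ops = ['*'] then some p
  else none

-- one iteration of B's single for-loop; state = (total, in_group, acc_sum, acc_prod, op_chars)
def stepB (g : List (List Char)) (st : Int × Bool × Int × Int × List Char) (c : Nat) :
    Option (Int × Bool × Int × Int × List Char) :=
  (colStrB g c).bind fun col =>
  if PySem.Chars.stripChars col [' '] = [] then
    if st.2.1 then
      (finB st.2.2.2.2 st.2.2.1 st.2.2.2.1).bind fun v =>
      some (st.1 + v, false, 0, 1, [])
    else some st
  else
    (PySem.List.pyGet? col (-1)).bind fun ch =>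
    let t := PySem.Chars.strip (PySem.List.slice col none (some (-1)))
    if t = [] then some (st.1, true, st.2.2.1, st.2.2.2.1, st.2.2.2.2 ++ [ch])
    else
      (PySem.Int.ofChars? t).bind fun n =>
      some (st.1, true, st.2.2.1 + n, st.2.2.2.1 * n, st.2.2.2.2 ++ [ch])

-- the trailing 'if in_group: total += close()'
def closeIfOpen (st : Int × Bool × Int × Int × List Char) : Option Int :=
  if st.2.1 then (finB st.2.2.2.2 st.2.2.1 st.2.2.2.1).bind fun v => some (st.1 + v)
  else some st.1

def computeB? (rows : List String) : Option Int :=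
  (PySem.List.pyGet? (rows.map String.toList) (0 : Int)).bind fun row0 =>  -- len(rows[0])
  ((List.range row0.length).foldlM (stepB (rows.map String.toList)) (0, false, 0, 1, [])).bind
    closeIfOpen

def compute_operations_reversed_alt (rows : List String) : Int :=
  (computeB? rows).getD 0   -- none = the Python raises; such inputs are outside Pre_

-- ===== PRECONDITION & SPEC =====
-- column c is non-empty (has a character other than ' ')
def pvNb (g : List (List Char)) (c : Nat) : Bool :=
  g.any (fun row => row.getD c ' ' != ' ')

-- [s, l] is a maximal run of non-empty columns inside the first W columns
def pvIsRun (g : List (List Char)) (W s l : Nat) : Bool :=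
  decide (s ≤ l) && pvNb g s && (s == 0 || !pvNb g (s - 1)) &&
  pvNb g l && (l + 1 == W || !pvNb g (l + 1)) &&
  ((List.range W).all fun c => !(decide (s ≤ c) && decide (c ≤ l)) || pvNb g c)

-- the parse conditions of one problem group [s, l]: every column's number text is empty or an
-- int literal, and the stripped last-row slice is '+' or '*'
def pvGroupOK (g : List (List Char)) (W s l : Nat) : Bool :=
  ((List.range W).all fun c => !(decide (s ≤ c) && decide (c ≤ l)) ||
    ((PySem.Chars.strip (g.dropLast.map (fun row => row.getD c ' ')) == []) ||
     (PySem.Int.ofChars? (PySem.Chars.strip (g.dropLast.map (fun row => row.getD c ' ')))).isSome)) &&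
  ((PySem.Chars.strip ((List.range' s (l + 1 - s)).map (fun c => (g.getLastD []).getD c ' ')) == ['+']) ||
   (PySem.Chars.strip ((List.range' s (l + 1 - s)).map (fun c => (g.getLastD []).getD c ' ')) == ['*']))

-- Exactly the inputs on which A returns normally, except that Pre_ also requires every row to have
-- at least len(rows[0]) characters: A raises IndexError on almost every shorter-row grid, but on a
-- few ragged grids A's short-circuit column scan happens never to touch the missing cells and A
-- still returns; those accidental survivors are excluded here (B reads every cell of the first
-- len(rows[0]) columns of every row and raises there).  The last conjunct says that each maximal
-- non-empty column run parses and carries a '+' or '*' operator, i.e. A raises no ValueError.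
def Pre_compute_operations_reversed (rows : List String) : Prop :=
  rows ≠ [] ∧
  (∀ row ∈ rows, (rows.headD "").toList.length ≤ row.toList.length) ∧
  ((List.range (rows.headD "").toList.length).all fun s =>
   (List.range (rows.headD "").toList.length).all fun l =>
     !pvIsRun (rows.map String.toList) (rows.headD "").toList.length s l ||
     pvGroupOK (rows.map String.toList) (rows.headD "").toList.length s l) = true

instance (rows : List String) : Decidable (Pre_compute_operations_reversed rows) := by
  unfold Pre_compute_operations_reversed; infer_instance

def pvWitness_compute_operations_reversed : List String := ["1 2", "3 4", "+ *"]

def Spec_compute_operations_reversed (rows : List String) (out : Int) : Prop :=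
  out = compute_operations_reversed_alt rows
instance (rows : List String) (out : Int) : Decidable (Spec_compute_operations_reversed rows out) := by
  unfold Spec_compute_operations_reversed; infer_instance

-- ===== CLAIM (what is proved, stated in full; the proofs are below) =====
def Claim_equal_compute_operations_reversed : Prop :=
  ∀ (rows : List String), Dom_compute_operations_reversed rows →
    Pre_compute_operations_reversed rows →
    Spec_compute_operations_reversed rows (compute_operations_reversed rows)

-- ===== LEMMAS AND PROOFS =====

-- column string built by B = total map over the rows, when column c exists in every row
theorem colStrB_eq (c : Nat) : ∀ (g : List (List Char)), (∀ row ∈ g, c < row.length) →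
    colStrB g c = some (g.map (fun row => row.getD c ' ')) := by
  intro g
  induction g with
  | nil => intro _; rfl
  | cons row rest ih =>
      intro h
      have hr : c < row.length := h row (by simp)
      simp [colStrB, PySem.List.pyGet?_natCast, List.getElem?_eq_getElem hr,
        ih (fun r hr' => h r (by simp [hr']))]

-- A's join over the top rows is the same map
theorem numStrA_eq (c : Nat) : ∀ (g : List (List Char)), (∀ row ∈ g, c < row.length) →
    numStrA g c = some (g.map (fun row => row.getD c ' ')) := by
  intro g
  induction g with
  | nil => intro _; rfl
  | cons row rest ih =>
      intro h
      have hr : c < row.length := h row (by simp)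
      simp [numStrA, PySem.List.pyGet?_natCast, List.getElem?_eq_getElem hr,
        ih (fun r hr' => h r (by simp [hr']))]

-- A's short-circuit any = List.any
theorem pyAnyColNe_eq (c : Nat) : ∀ (g : List (List Char)), (∀ row ∈ g, c < row.length) →
    pyAnyColNe g c = some (pvNb g c) := by
  intro g
  induction g with
  | nil => intro _; rfl
  | cons row rest ih =>
      intro h
      have hr : c < row.length := h row (by simp)
      have hrec := ih (fun r hr' => h r (by simp [hr']))
      by_cases hch : row[c] = ' '
      · simp [pyAnyColNe, PySem.List.pyGet?_natCast, List.getElem?_eq_getElem hr, hch,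
          pvNb, List.any_cons] at *
        simpa [pvNb] using hrec
      · simp [pyAnyColNe, PySem.List.pyGet?_natCast, List.getElem?_eq_getElem hr, hch,
          pvNb, List.any_cons]

theorem flagsA_eq (g : List (List Char)) : ∀ (cs : List Nat),
    (∀ c ∈ cs, ∀ row ∈ g, c < row.length) →
    flagsA g cs = some (cs.map (pvNb g)) := by
  intro cs
  induction cs with
  | nil => intro _; rfl
  | cons c cs ih =>
      intro h
      simp [flagsA, pyAnyColNe_eq c g (h c (by simp)), ih (fun c' hc' => h c' (by simp [hc']))]

-- stripping spaces yields [] iff everything is a space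
theorem stripChars_space_empty_iff (cs : List Char) :
    PySem.Chars.stripChars cs [' '] = [] ↔ ∀ x ∈ cs, x = ' ' := by
  unfold PySem.Chars.stripChars
  simp only [List.reverse_eq_nil_iff, List.dropWhile_eq_nil_iff, List.mem_reverse]
  constructor
  · intro h x hx
    have hsplit := List.takeWhile_append_dropWhile
      (p := fun c => List.contains [' '] c) (l := cs)
    rw [← hsplit] at hx
    rcases List.mem_append.mp hx with h1 | h2
    · have := List.mem_takeWhile_imp h1; simpa using this
    · have := h x h2; simpa using this
  · intro h x hx
    have hx' : x ∈ cs := (List.dropWhile_sublist _).mem hx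
    simpa using h x hx'

-- B's blank-column test = A's per-cell test
theorem stripChars_space_ne (cs : List Char) :
    (PySem.Chars.stripChars cs [' '] != []) = cs.any (fun ch => ch != ' ') := by
  cases h : cs.any (fun ch => ch != ' ') with
  | false =>
      have hall : ∀ x ∈ cs, x = ' ' := by
        intro x hx
        have := List.any_eq_false.mp h x hx
        simpa using this
      simp [(stripChars_space_empty_iff cs).mpr hall]
  | true =>
      obtain ⟨x, hx, hpx⟩ := List.any_eq_true.mp h
      have hne : PySem.Chars.stripChars cs [' '] ≠ [] := by
        intro hh
        have hx' : x = ' ' := (stripChars_space_empty_iff cs).mp hh x hx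
        rw [hx'] at hpx
        simp at hpx
      simp [hne]

-- slice of a row = map of getD over the index range
theorem drop_take_eq_map_range' {α : Type} (d : α) :
    ∀ (k s : Nat) (l : List α), s + k ≤ l.length →
    (l.drop s).take k = (List.range' s k).map (fun c => l.getD c d) := by
  intro k
  induction k with
  | zero => intro s l _; simp
  | succ k ih =>
      intro s l h
      have hs : s < l.length := by omega
      have hgd : l.getD s d = l[s] := by
        rw [List.getD_eq_getElem?_getD, List.getElem?_eq_getElem hs]; rfl
      rw [List.range'_succ, List.drop_eq_getElem_cons hs, List.take_succ_cons,
        List.map_cons, hgd, ih (s + 1) l (by omega)]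

theorem pv_getLast?_eq {α : Type} (l : List α) (d : α) (h : l ≠ []) :
    l.getLast? = some (l.getLastD d) := by
  have h1 : l.getLast?.isSome := List.getLast?_isSome.mpr h
  obtain ⟨x, hx⟩ := Option.isSome_iff_exists.mp h1
  rw [hx, List.getLastD_eq_getLast?, hx]; rfl

theorem pv_getLastD_mem {α : Type} (l : List α) (d : α) (h : l ≠ []) :
    l.getLastD d ∈ l :=
  List.mem_of_getLast? (pv_getLast?_eq l d h)

-- length of the leading run of non-empty columns
def runLen : List Bool → Nat
  | true :: rest => 1 + runLen rest
  | _ => 0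

theorem goProblems_inRun : ∀ (flags : List Bool) (c s : Nat),
    goProblems flags c (some s) =
      (s, c + runLen flags) :: goProblems (flags.drop (runLen flags)) (c + runLen flags) none := by
  intro flags
  induction flags with
  | nil => intro c s; rfl
  | cons b rest ih =>
      intro c s
      cases b with
      | false => rfl
      | true =>
          have h1 : runLen (true :: rest) = 1 + runLen rest := rfl
          have hd : (true :: rest).drop (1 + runLen rest) = rest.drop (runLen rest) := by
            rw [Nat.add_comm]; rfl
          show goProblems rest (c + 1) (some s) = _
          rw [ih (c + 1) s, h1, hd, ← Nat.add_assoc]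

-- A's per-problem fold
def goFoldA (g : List (List Char)) (total : Int) (ps : List (Nat × Nat)) : Option Int :=
  ps.foldlM (fun acc p => (problemValueA g p.1 p.2).bind fun v => some (acc + v)) total

-- B's loop over columns c0 … c0+k-1 followed by the trailing close
def runB (g : List (List Char)) (st : Int × Bool × Int × Int × List Char) (c0 k : Nat) : Option Int :=
  ((List.range' c0 k).foldlM (stepB g) st).bind closeIfOpen

-- last-row character of column c
def opch (g : List (List Char)) (c : Nat) : Char := (g.getLastD []).getD c ' '

-- collectNumsA splits over append
theorem collectNumsA_append (g : List (List Char)) : ∀ (xs ys : List Nat),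
    collectNumsA g (xs ++ ys)
      = (collectNumsA g xs).bind fun a => (collectNumsA g ys).bind fun b => some (a ++ b) := by
  intro xs ys
  induction xs with
  | nil => simp [collectNumsA]
  | cons c cs ih =>
      simp only [List.cons_append, collectNumsA]
      cases numStrA g.dropLast c with
      | none => rfl
      | some s =>
          simp only [Option.bind_some]
          by_cases ht : PySem.Chars.strip s = []
          · simp [ht, ih]
          · rw [if_neg ht, if_neg ht]
            cases PySem.Int.ofChars? (PySem.Chars.strip s) with
            | none => rfl
            | some n =>
                simp only [Option.bind_some, ih]
                cases collectNumsA g cs with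
                | none => rfl
                | some a =>
                    cases collectNumsA g ys with
                    | none => rfl
                    | some b => simp

-- sum as a foldl
theorem foldl_add_sum (l : List Int) : ∀ (a : Int), l.foldl (· + ·) a = a + l.sum := by
  induction l with
  | nil => intro a; simp
  | cons x xs ih => intro a; simp [List.foldl_cons, ih, List.sum_cons]; ring

-- facts about a single column c < W, given every row has ≥ W characters
theorem opt_none_bind {α β : Type} (f : α → Option β) : (none : Option α).bind f = none := rfl

theorem opt_some_bind {α β : Type} (a : α) (f : α → Option β) : (some a).bind f = f a := rfl

theorem range'_succ_one (c0 k : Nat) : List.range' c0 (k + 1) = c0 :: List.range' (c0 + 1) k :=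
  List.range'_succ

theorem pv_range'_append (s m n : Nat) :
    List.range' s (m + n) = List.range' s m ++ List.range' (s + m) n := by
  induction m generalizing s with
  | zero => simp
  | succ m ihm =>
      rw [show m + 1 + n = (m + n) + 1 from by omega, range'_succ_one, ihm (s + 1),
        range'_succ_one, List.cons_append, show s + 1 + m = s + (m + 1) from by omega]

theorem pv_range'_one (s : Nat) : List.range' s 1 = [s] := by
  rw [range'_succ_one]
  rfl

theorem goFoldA_cons (g : List (List Char)) (total : Int) (p : Nat × Nat)
    (ps : List (Nat × Nat)) :
    goFoldA g total (p :: ps)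
      = (problemValueA g p.1 p.2).bind fun v => goFoldA g (total + v) ps := by
  unfold goFoldA
  rw [List.foldlM_cons]
  cases problemValueA g p.1 p.2 <;> rfl

theorem stepB_nonblank (g : List (List Char)) (W : Nat) (hg : g ≠ [])
    (hW : ∀ row ∈ g, W ≤ row.length) (c : Nat) (hc : c < W) (hnb : pvNb g c = true)
    (tot : Int) (ing : Bool) (s p : Int) (ops : List Char) :
    stepB g (tot, ing, s, p, ops) c = (collectNumsA g [c]).bind fun ns =>
      some (tot, true, ns.foldl (· + ·) s, ns.foldl (· * ·) p, ops ++ [opch g c]) := by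
  have hcol : colStrB g c = some (g.map (fun row => row.getD c ' ')) :=
    colStrB_eq c g (fun row hr => lt_of_lt_of_le hc (hW row hr))
  have hnum : numStrA g.dropLast c = some (g.dropLast.map (fun row => row.getD c ' ')) := by
    apply numStrA_eq
    intro row hrow
    exact lt_of_lt_of_le hc (hW row (List.mem_of_mem_dropLast hrow))
  have hblank : (PySem.Chars.stripChars (g.map (fun row => row.getD c ' ')) [' '] = []) = False := by
    have h2 : (PySem.Chars.stripChars (g.map (fun row => row.getD c ' ')) [' '] != []) = true := by
      rw [stripChars_space_ne, List.any_map]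
      exact hnb
    simp only [eq_iff_iff, iff_false]
    intro hh
    rw [hh] at h2
    simp at h2
  have hlastget : PySem.List.pyGet? (g.map (fun row => row.getD c ' ')) (-1)
      = some (opch g c) := by
    rw [PySem.List.pyGet?_neg_one, List.getLast?_map, pv_getLast?_eq g [] hg]
    rfl
  have hslice : PySem.List.slice (g.map (fun row => row.getD c ' ')) none (some (-1))
      = g.dropLast.map (fun row => row.getD c ' ') := by
    rw [PySem.List.slice_to_neg_one, List.map_dropLast]
  simp only [stepB, hcol, Option.bind_some, hblank, if_false, hlastget, hslice,
    collectNumsA, hnum]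
  split_ifs
  all_goals first
    | rfl
    | (rw [Option.bind_assoc]; rfl)

theorem stepB_blank_aux (g : List (List Char)) (c : Nat) (hnb : pvNb g c = false) :
    PySem.Chars.stripChars (g.map (fun row => row.getD c ' ')) [' '] = [] := by
  have h2 : (PySem.Chars.stripChars (g.map (fun row => row.getD c ' ')) [' '] != []) = false := by
    rw [stripChars_space_ne, List.any_map]
    exact hnb
  simpa using h2

theorem stepB_blank_closed (g : List (List Char)) (W : Nat)
    (hW : ∀ row ∈ g, W ≤ row.length) (c : Nat) (hc : c < W) (hnb : pvNb g c = false)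
    (tot : Int) (s p : Int) (ops : List Char) :
    stepB g (tot, false, s, p, ops) c = some (tot, false, s, p, ops) := by
  have hcol : colStrB g c = some (g.map (fun row => row.getD c ' ')) :=
    colStrB_eq c g (fun row hr => lt_of_lt_of_le hc (hW row hr))
  simp only [stepB, hcol, Option.bind_some]
  rw [if_pos (stepB_blank_aux g c hnb)]
  rfl

theorem stepB_blank_open (g : List (List Char)) (W : Nat)
    (hW : ∀ row ∈ g, W ≤ row.length) (c : Nat) (hc : c < W) (hnb : pvNb g c = false)
    (tot : Int) (s p : Int) (ops : List Char) :
    stepB g (tot, true, s, p, ops) c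
      = (finB ops s p).bind fun v => some (tot + v, false, 0, 1, ([] : List Char)) := by
  have hcol : colStrB g c = some (g.map (fun row => row.getD c ' ')) :=
    colStrB_eq c g (fun row hr => lt_of_lt_of_le hc (hW row hr))
  simp only [stepB, hcol, Option.bind_some]
  rw [if_pos (stepB_blank_aux g c hnb)]
  rfl

-- closing a group = A's evaluation of the corresponding problem (s0, c0)
theorem closeEq (g : List (List Char)) (W : Nat) (hg : g ≠ [])
    (hW : ∀ row ∈ g, W ≤ row.length) (s0 c0 : Nat) (hs : s0 ≤ c0) (hc : c0 ≤ W)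
    (nums0 : List Int)
    (hnums : collectNumsA g (List.range' s0 (c0 - s0)) = some nums0) (total : Int) :
    ((finB ((List.range' s0 (c0 - s0)).map (opch g)) (nums0.foldl (· + ·) 0)
        (nums0.foldl (· * ·) 1)).bind fun v => some (total + v))
    = (problemValueA g s0 c0).bind fun v => some (total + v) := by
  have hlast : W ≤ (g.getLastD []).length := hW _ (pv_getLastD_mem g [] hg)
  have hglen : g.length ≠ 0 := fun hh => hg (List.eq_nil_of_length_eq_zero hh)
  have hidx : ((g.length : Int) - 1) = ((g.length - 1 : Nat) : Int) := by omega
  have hrow : PySem.List.pyGet? g ((g.length : Int) - 1) = some (g.getLastD []) := by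
    rw [hidx, PySem.List.pyGet?_natCast, ← List.getLast?_eq_getElem?]
    exact pv_getLast?_eq g [] hg
  have hslice : PySem.Chars.strip (PySem.List.slice (g.getLastD [])
        (some ((s0 : Nat) : Int)) (some ((c0 : Nat) : Int)))
      = PySem.Chars.strip ((List.range' s0 (c0 - s0)).map (opch g)) := by
    rw [PySem.List.slice_natCast]
    rw [show opch g = fun c => (g.getLastD []).getD c ' ' from rfl]
    rw [← drop_take_eq_map_range' ' ' (c0 - s0) s0 (g.getLastD []) (by omega)]
  unfold problemValueA finB
  rw [hnums, hrow]
  simp only [Option.bind_some, hslice, foldl_add_sum nums0 0, zero_add]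

-- when an Option-producing fold starts from a failing first step
theorem goFoldA_cons_none (g : List (List Char)) (total : Int) (p : Nat × Nat)
    (ps : List (Nat × Nat)) (h : problemValueA g p.1 p.2 = none) :
    goFoldA g total (p :: ps) = none := by
  rw [goFoldA_cons, h]
  rfl

theorem runB_succ (g : List (List Char)) (st : Int × Bool × Int × Int × List Char)
    (c0 k : Nat) :
    runB g st c0 (k + 1) = (stepB g st c0).bind fun st' => runB g st' (c0 + 1) k := by
  unfold runB
  rw [range'_succ_one, List.foldlM_cons]
  cases stepB g st c0 <;> rfl

-- ===== the main single-pass ↔ staged-passes correspondence =====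
theorem mainAB (g : List (List Char)) (hg : g ≠ []) (W : Nat)
    (hW : ∀ row ∈ g, W ≤ row.length) :
    ∀ k : Nat,
      (∀ c0 total, c0 + k ≤ W →
        runB g (total, false, 0, 1, []) c0 k
          = goFoldA g total (goProblems ((List.range' c0 k).map (pvNb g)) c0 none))
      ∧ (∀ c0 s0 nums0 total, c0 + k ≤ W → s0 ≤ c0 →
        collectNumsA g (List.range' s0 (c0 - s0)) = some nums0 →
        runB g (total, true, nums0.foldl (· + ·) 0, nums0.foldl (· * ·) 1,
            (List.range' s0 (c0 - s0)).map (opch g)) c0 k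
          = goFoldA g total (goProblems ((List.range' c0 k).map (pvNb g)) c0 (some s0))) := by
  intro k
  induction k with
  | zero =>
      constructor
      · intro c0 total _
        rfl
      · intro c0 s0 nums0 total h1 h2 h3
        have lhs : runB g (total, true, nums0.foldl (· + ·) 0, nums0.foldl (· * ·) 1,
            (List.range' s0 (c0 - s0)).map (opch g)) c0 0
            = (finB ((List.range' s0 (c0 - s0)).map (opch g)) (nums0.foldl (· + ·) 0)
                (nums0.foldl (· * ·) 1)).bind fun v => some (total + v) := rfl
        rw [lhs, closeEq g W hg hW s0 c0 h2 (by omega) nums0 h3 total]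
        have hA : goProblems ((List.range' c0 0).map (pvNb g)) c0 (some s0) = [(s0, c0)] := rfl
        rw [hA, goFoldA_cons]
        cases problemValueA g s0 c0 <;> rfl
  | succ k ih =>
      constructor
      · -- closed state
        intro c0 total hle
        cases hnb : pvNb g c0 with
        | false =>
            have hA : goProblems ((List.range' c0 (k + 1)).map (pvNb g)) c0 none
                = goProblems ((List.range' (c0 + 1) k).map (pvNb g)) (c0 + 1) none := by
              rw [range'_succ_one, List.map_cons]
              simp [goProblems, hnb]
            rw [runB_succ, stepB_blank_closed g W hW c0 (by omega) hnb, opt_some_bind, hA]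
            exact ih.1 (c0 + 1) total (by omega)
        | true =>
            have hA : goProblems ((List.range' c0 (k + 1)).map (pvNb g)) c0 none
                = goProblems ((List.range' (c0 + 1) k).map (pvNb g)) (c0 + 1) (some c0) := by
              rw [range'_succ_one, List.map_cons]
              simp [goProblems, hnb]
            rw [runB_succ, stepB_nonblank g W hg hW c0 (by omega) hnb, hA]
            cases hns : collectNumsA g [c0] with
            | none =>
                rw [opt_none_bind, goProblems_inRun]
                apply Eq.symm
                apply goFoldA_cons_none
                unfold problemValueA
                have hsplit : List.range' c0 (c0 + 1 + runLen ((List.range' (c0 + 1) k).map (pvNb g)) - c0)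
                    = [c0] ++ List.range' (c0 + 1) (runLen ((List.range' (c0 + 1) k).map (pvNb g))) := by
                  rw [show c0 + 1 + runLen ((List.range' (c0 + 1) k).map (pvNb g)) - c0
                      = 1 + runLen ((List.range' (c0 + 1) k).map (pvNb g)) from by omega]
                  rw [pv_range'_append c0 1 (runLen ((List.range' (c0 + 1) k).map (pvNb g))),
                    pv_range'_one]
                rw [hsplit, collectNumsA_append, hns]
                rfl
            | some ns =>
                rw [opt_some_bind]
                have h1 : List.range' c0 (c0 + 1 - c0) = [c0] := by
                  rw [show c0 + 1 - c0 = 1 from by omega]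
                  rfl
                have hrec := ih.2 (c0 + 1) c0 ns total (by omega) (by omega)
                  (by rw [h1]; exact hns)
                rw [h1] at hrec
                simpa using hrec
      · -- open state: a group (started at s0) is in progress
        intro c0 s0 nums0 total hle hs hnums
        cases hnb : pvNb g c0 with
        | false =>
            -- blank column closes the group; A pops problem (s0, c0)
            have hA : goProblems ((List.range' c0 (k + 1)).map (pvNb g)) c0 (some s0)
                = (s0, c0) :: goProblems ((List.range' (c0 + 1) k).map (pvNb g)) (c0 + 1) none := by
              rw [range'_succ_one, List.map_cons]
              simp [goProblems, hnb]
            rw [runB_succ, stepB_blank_open g W hW c0 (by omega) hnb, hA, goFoldA_cons]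
            have hclose := closeEq g W hg hW s0 c0 hs (by omega) nums0 hnums total
            cases hfin : finB ((List.range' s0 (c0 - s0)).map (opch g))
                (nums0.foldl (· + ·) 0) (nums0.foldl (· * ·) 1) with
            | none =>
                have hpv : problemValueA g s0 c0 = none := by
                  cases hp : problemValueA g s0 c0 with
                  | none => rfl
                  | some v => rw [hfin, hp] at hclose; simp at hclose
                rw [opt_none_bind, hpv]
                rfl
            | some v =>
                have hpv : problemValueA g s0 c0 = some v := by
                  cases hp : problemValueA g s0 c0 with
                  | none => rw [hfin, hp] at hclose; simp at hclose
                  | some v' =>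
                      rw [hfin, hp] at hclose
                      simp only [opt_some_bind, Option.some.injEq] at hclose
                      have hv : v' = v := by omega
                      rw [hv]
                rw [opt_some_bind, hpv, opt_some_bind]
                exact ih.1 (c0 + 1) (total + v) (by omega)
        | true =>
            have hA : goProblems ((List.range' c0 (k + 1)).map (pvNb g)) c0 (some s0)
                = goProblems ((List.range' (c0 + 1) k).map (pvNb g)) (c0 + 1) (some s0) := by
              rw [range'_succ_one, List.map_cons]
              simp [goProblems, hnb]
            rw [runB_succ, stepB_nonblank g W hg hW c0 (by omega) hnb, hA]
            cases hns : collectNumsA g [c0] with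
            | none =>
                rw [opt_none_bind, goProblems_inRun]
                apply Eq.symm
                apply goFoldA_cons_none
                unfold problemValueA
                have hsplit : List.range' s0 (c0 + 1 + runLen ((List.range' (c0 + 1) k).map (pvNb g)) - s0)
                    = List.range' s0 (c0 - s0) ++ ([c0]
                        ++ List.range' (c0 + 1) (runLen ((List.range' (c0 + 1) k).map (pvNb g)))) := by
                  rw [show c0 + 1 + runLen ((List.range' (c0 + 1) k).map (pvNb g)) - s0
                      = (c0 - s0) + (1 + runLen ((List.range' (c0 + 1) k).map (pvNb g))) from by omega]
                  rw [pv_range'_append s0 (c0 - s0) (1 + runLen ((List.range' (c0 + 1) k).map (pvNb g))),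
                    show s0 + (c0 - s0) = c0 from by omega,
                    pv_range'_append c0 1 (runLen ((List.range' (c0 + 1) k).map (pvNb g))),
                    pv_range'_one]
                rw [hsplit, collectNumsA_append, hnums, Option.bind_some, collectNumsA_append, hns]
                rfl
            | some ns =>
                rw [opt_some_bind]
                have hsplit : List.range' s0 (c0 + 1 - s0) = List.range' s0 (c0 - s0) ++ [c0] := by
                  rw [show c0 + 1 - s0 = (c0 - s0) + 1 from by omega,
                    pv_range'_append s0 (c0 - s0) 1,
                    show s0 + (c0 - s0) = c0 from by omega, pv_range'_one]
                have hnums' : collectNumsA g (List.range' s0 (c0 + 1 - s0)) = some (nums0 ++ ns) := by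
                  rw [hsplit, collectNumsA_append, hnums, Option.bind_some, hns]
                  rfl
                have hrec := ih.2 (c0 + 1) s0 (nums0 ++ ns) total (by omega) (by omega) hnums'
                rw [hsplit] at hrec
                simpa [List.foldl_append, List.map_append] using hrec

theorem computeAB (rows : List String) (h0 : rows ≠ [])
    (hlen : ∀ row ∈ rows, (rows.headD "").toList.length ≤ row.toList.length) :
    computeA? rows = computeB? rows := by
  obtain ⟨r0, rest, rfl⟩ : ∃ a t, rows = a :: t := by
    cases rows with
    | nil => exact absurd rfl h0
    | cons a t => exact ⟨a, t, rfl⟩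
  have hgne : (r0 :: rest).map String.toList ≠ [] := by simp
  have hW : ∀ row ∈ (r0 :: rest).map String.toList, r0.toList.length ≤ row.length := by
    intro row hr
    obtain ⟨s, hs, rfl⟩ := List.mem_map.mp hr
    have := hlen s hs
    simpa using this
  have hrowlen : ∀ c ∈ List.range r0.toList.length,
      ∀ row ∈ (r0 :: rest).map String.toList, c < row.length := by
    intro c hc row hr
    have h1 := hW row hr
    have h2 := List.mem_range.mp hc
    omega
  have hget0 : PySem.List.pyGet? ((r0 :: rest).map String.toList) (0 : Int) = some r0.toList := by
    rw [List.map_cons]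
    exact PySem.List.pyGet?_zero_cons _ _
  unfold computeA? computeB?
  rw [hget0]
  simp only [Option.bind_some]
  rw [flagsA_eq ((r0 :: rest).map String.toList) (List.range r0.toList.length) hrowlen]
  simp only [Option.bind_some]
  have hmain := (mainAB ((r0 :: rest).map String.toList) hgne r0.toList.length hW
      r0.toList.length).1 0 0 (by omega)
  rw [List.range_eq_range']
  exact hmain.symm

-- ===== VERDICT (by name: the statement is the Claim_ definition above) =====
theorem compute_operations_reversed_spec : Claim_equal_compute_operations_reversed := by
  intro rows _ hpre
  unfold Spec_compute_operations_reversed compute_operations_reversed compute_operations_reversed_alt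
  rw [computeAB rows hpre.1 hpre.2.1]
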